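-- pv_equiv track=rewrite | github.com/CoreAspectStu/autocoder-custom | custom/uat_gateway/test_executor/smart_selector.py | _find_dependencies
-- ===== SOURCE A (Python) =====
-- from typing import List, Dict, Set, Optional, Tuple, Any
--
-- def _find_dependencies(
--
--     test_name: str,
--     all_tests: List[str],
--     test_files: Optional[Dict[str, str]] = None
-- ) -> Set[str]:
--     """Find tests that this test depends on"""
--     dependencies = set()
--     test_lower = test_name.lower()
--
--     # Heuristic: Tests with "login" in name depend on user creation tests
--     if 'login' in test_lower:
--         for other_test in all_tests:
--             if 'create' in other_test.lower() and 'user' in other_test.lower():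
--                 dependencies.add(other_test)
--
--     # Heuristic: "delete" tests depend on corresponding "create" tests
--     if 'delete' in test_lower:
--         resource = test_lower.replace('delete', '').strip()
--         for other_test in all_tests:
--             if f'create{resource}' in other_test.lower():
--                 dependencies.add(other_test)
--
--     # Heuristic: "update" tests depend on corresponding "create" tests
--     if 'update' in test_lower:
--         resource = test_lower.replace('update', '').strip()
--         for other_test in all_tests:
--             if f'create{resource}' in other_test.lower():
--                 dependencies.add(other_test)
--
--     return dependencies
-- ===== SOURCE B (Python) =====
-- def _find_dependencies(test_name, all_tests, test_files=None):
--     tl = test_name.lower()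
--     # Anchor index, built once: for each test, the list of suffixes that follow
--     # each occurrence of 'create' in its lowercased name.  Every heuristic then
--     # becomes a prefix test against this index instead of a substring search.
--     index = []
--     for t in all_tests:
--         low = t.lower()
--         tails = [low[i + 6:] for i in range(len(low)) if low[i:i + 6] == 'create']
--         index.append((t, low, tails))
--     deps = set()
--     if 'login' in tl:
--         for t, low, tails in index:
--             if tails and 'user' in low:
--                 deps.add(t)
--     for key in ('delete', 'update'):
--         if key in tl:
--             res = tl.replace(key, '').strip()
--             for t, _, tails in index:
--                 if any(s.startswith(res) for s in tails):
--                     deps.add(t)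
--     return deps
-- ===== Notes on version B (the rewrite author's own statement) =====
-- stated objective: alternative
-- what changed: B builds an anchor index once (for every test, the list of suffixes following each occurrence of 'create' in its lowercased name) and answers each heuristic by prefix tests against that index -- 'login' becomes 'index nonempty and user present', 'delete'/'update' become 'some anchored suffix starts with the stripped resource' -- replacing A's repeated 'create'+resource substring searches over re-lowercased strings.
import Mathlib
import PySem

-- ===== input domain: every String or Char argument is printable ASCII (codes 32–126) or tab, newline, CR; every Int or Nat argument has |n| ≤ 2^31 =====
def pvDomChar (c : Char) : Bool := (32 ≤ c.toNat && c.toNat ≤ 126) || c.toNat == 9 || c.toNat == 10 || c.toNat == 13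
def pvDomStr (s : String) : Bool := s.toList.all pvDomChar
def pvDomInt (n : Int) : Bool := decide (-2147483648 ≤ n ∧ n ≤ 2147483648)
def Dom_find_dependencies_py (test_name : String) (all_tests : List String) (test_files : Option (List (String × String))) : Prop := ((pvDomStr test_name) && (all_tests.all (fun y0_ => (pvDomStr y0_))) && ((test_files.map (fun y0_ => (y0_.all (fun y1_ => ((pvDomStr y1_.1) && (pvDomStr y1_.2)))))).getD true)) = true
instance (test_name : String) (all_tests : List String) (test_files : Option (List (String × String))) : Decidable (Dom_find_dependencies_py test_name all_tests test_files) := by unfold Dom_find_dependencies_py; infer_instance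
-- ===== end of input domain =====

-- B builds an anchor index once (per test, the suffixes after each 'create' occurrence in its
-- lowercased name) and answers every heuristic by prefix tests against that index instead of
-- A's repeated 'create'+resource substring searches (objective: alternative algorithm).

-- ===== PORT A =====
def find_dependencies_py (test_name : String) (all_tests : List String) (test_files : Option (List (String × String))) : List String :=
  let test_lower := PySem.Chars.lower test_name.toList
  let dependencies : PySem.Set String := PySem.Set.empty
  let dependencies :=
    if PySem.Chars.isIn "login".toList test_lower then
      all_tests.foldl (fun s other_test =>
        if PySem.Chars.isIn "create".toList (PySem.Chars.lower other_test.toList)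
            && PySem.Chars.isIn "user".toList (PySem.Chars.lower other_test.toList) then
          PySem.Set.add s other_test
        else s) dependencies
    else dependencies
  let dependencies :=
    if PySem.Chars.isIn "delete".toList test_lower then
      let resource := PySem.Chars.strip (PySem.Chars.replace test_lower "delete".toList [])
      all_tests.foldl (fun s other_test =>
        if PySem.Chars.isIn ("create".toList ++ resource) (PySem.Chars.lower other_test.toList) then
          PySem.Set.add s other_test
        else s) dependencies
    else dependencies
  let dependencies :=
    if PySem.Chars.isIn "update".toList test_lower then
      let resource := PySem.Chars.strip (PySem.Chars.replace test_lower "update".toList [])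
      all_tests.foldl (fun s other_test =>
        if PySem.Chars.isIn ("create".toList ++ resource) (PySem.Chars.lower other_test.toList) then
          PySem.Set.add s other_test
        else s) dependencies
    else dependencies
  dependencies

-- ===== PORT B =====
-- [low[i+6:] for i in range(len(low)) if low[i:i+6] == 'create']
-- the slices low[i:i+6] / low[i+6:] are ported as clamped take/drop, exact for these
-- nonnegative bounds (PySem.List.slice_natCast / slice_from_natCast).
def pvAnchorTails (low : List Char) : List (List Char) :=
  (List.range low.length).filterMap (fun i =>
    if (low.drop i).take 6 = "create".toList then some (low.drop (i + 6)) else none)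

def find_dependencies_py_alt (test_name : String) (all_tests : List String) (test_files : Option (List (String × String))) : List String :=
  let tl := PySem.Chars.lower test_name.toList
  let index := all_tests.map (fun t =>
    let low := PySem.Chars.lower t.toList
    (t, low, pvAnchorTails low))
  let deps : PySem.Set String := PySem.Set.empty
  let deps :=
    if PySem.Chars.isIn "login".toList tl then
      index.foldl (fun s e =>
        if !e.2.2.isEmpty && PySem.Chars.isIn "user".toList e.2.1 then PySem.Set.add s e.1 else s) deps
    else deps
  let deps :=
    ["delete".toList, "update".toList].foldl (fun deps key =>
      if PySem.Chars.isIn key tl then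
        let res := PySem.Chars.strip (PySem.Chars.replace tl key [])
        index.foldl (fun s e =>
          if e.2.2.any (fun tail => PySem.Chars.startswith tail res) then PySem.Set.add s e.1 else s) deps
      else deps) deps
  deps

-- ===== PRECONDITION & SPEC =====
def Spec_find_dependencies_py (test_name : String) (all_tests : List String) (test_files : Option (List (String × String))) (out : List String) : Prop := out = find_dependencies_py_alt test_name all_tests test_files
instance (test_name : String) (all_tests : List String) (test_files : Option (List (String × String))) (out : List String) : Decidable (Spec_find_dependencies_py test_name all_tests test_files out) := by unfold Spec_find_dependencies_py; infer_instance

-- ===== CLAIM =====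
def Claim_equal_find_dependencies_py : Prop := ∀ (test_name : String) (all_tests : List String) (test_files : Option (List (String × String))), Dom_find_dependencies_py test_name all_tests test_files → Spec_find_dependencies_py test_name all_tests test_files (find_dependencies_py test_name all_tests test_files)

-- ===== LEMMAS AND PROOFS =====

theorem pvPrefix_append_iff (a r s : List Char) :
    a ++ r <+: s ↔ a <+: s ∧ r <+: s.drop a.length := by
  constructor
  · rintro ⟨t, rfl⟩
    refine ⟨⟨r ++ t, by simp⟩, ?_⟩
    rw [List.append_assoc, List.drop_left]
    exact ⟨t, rfl⟩
  · rintro ⟨⟨u, hu⟩, ⟨v, hv⟩⟩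
    refine ⟨v, ?_⟩
    have : s = a ++ s.drop a.length := by
      conv_lhs => rw [← hu]
      rw [← hu, List.drop_left]
    rw [this, ← hv, List.append_assoc]

-- B's prefix tests against the anchor index compute exactly A's 'create'+r substring test
theorem pvAnchorTails_any (r low : List Char) :
    (pvAnchorTails low).any (fun tail => PySem.Chars.startswith tail r)
      = PySem.Chars.isIn ("create".toList ++ r) low := by
  have hdd : ∀ j : Nat, (low.drop j).drop ("create".toList.length) = low.drop (j + 6) := by
    intro j
    show (low.drop j).drop 6 = low.drop (j + 6)
    rw [List.drop_drop, Nat.add_comm]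
  have hiff : ((pvAnchorTails low).any (fun tail => PySem.Chars.startswith tail r) = true)
      ↔ (PySem.Chars.isIn ("create".toList ++ r) low = true) := by
    rw [← PySem.Chars.exists_prefix_drop_iff_isIn]
    unfold pvAnchorTails
    simp only [List.any_eq_true, List.mem_filterMap, List.mem_range,
      Option.ite_none_right_eq_some, Option.some.injEq]
    constructor
    · rintro ⟨tail, ⟨i, hi, h6, htail⟩, hpre⟩
      have h6' : (low.drop i).take 6 = "create".toList := h6
      refine ⟨i, ?_⟩
      rw [pvPrefix_append_iff]
      refine ⟨⟨(low.drop i).drop 6, by rw [← h6']; exact List.take_append_drop 6 _⟩, ?_⟩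
      rw [hdd i, htail]
      exact (PySem.Chars.startswith_iff _ _).mp hpre
    · rintro ⟨j, hj⟩
      rw [pvPrefix_append_iff] at hj
      obtain ⟨hc, hr⟩ := hj
      have hjlt : j < low.length := by
        by_contra hge
        have hnil : low.drop j = [] := List.drop_eq_nil_of_le (by omega)
        rw [hnil] at hc
        have := List.eq_nil_of_prefix_nil hc
        simp at this
      have htake : (low.drop j).take 6 = "create".toList := by
        obtain ⟨u, hu⟩ := hc
        rw [← hu]; simp
      refine ⟨low.drop (j + 6), ⟨j, hjlt, ?_, rfl⟩, ?_⟩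
      · exact htake
      · rw [PySem.Chars.startswith_iff, ← hdd j]
        exact hr
  exact Bool.eq_iff_iff.mpr hiff

-- the index is nonempty exactly when 'create' occurs
theorem pvAnchorTails_ne (low : List Char) :
    (!(pvAnchorTails low).isEmpty) = PySem.Chars.isIn "create".toList low := by
  have h := pvAnchorTails_any [] low
  simp only [List.append_nil] at h
  rw [← h]
  cases hpv : pvAnchorTails low with
  | nil => simp
  | cons x xs =>
      simp only [List.isEmpty_cons, Bool.not_false, List.any_cons]
      have : PySem.Chars.startswith x [] = true := by
        rw [PySem.Chars.startswith_iff]; exact List.nil_prefix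
      simp [this]

theorem pvStage {β : Type} (all_tests : List String) (q : String → List Char → List (List Char) → Bool)
    (p : String → Bool) (g : β → String → β)
    (h : ∀ t, q t (PySem.Chars.lower t.toList) (pvAnchorTails (PySem.Chars.lower t.toList)) = p t) :
    ∀ (s : β),
      (all_tests.map (fun t => (t, PySem.Chars.lower t.toList, pvAnchorTails (PySem.Chars.lower t.toList)))).foldl
          (fun s e => if q e.1 e.2.1 e.2.2 then g s e.1 else s) s
        = all_tests.foldl (fun s t => if p t then g s t else s) s := by
  induction all_tests with
  | nil => intro s; rfl
  | cons x xs ih =>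
      intro s
      simp only [List.map_cons, List.foldl_cons, h x]
      exact ih _

theorem find_dependencies_py_eq (test_name : String) (all_tests : List String)
    (test_files : Option (List (String × String))) :
    find_dependencies_py test_name all_tests test_files
      = find_dependencies_py_alt test_name all_tests test_files := by
  simp only [find_dependencies_py, find_dependencies_py_alt, List.foldl_cons, List.foldl_nil]
  rw [pvStage all_tests
        (fun _ low tails => !tails.isEmpty && PySem.Chars.isIn "user".toList low)
        (fun t => PySem.Chars.isIn "create".toList (PySem.Chars.lower t.toList)
            && PySem.Chars.isIn "user".toList (PySem.Chars.lower t.toList))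
        PySem.Set.add
        (fun t => by simp only [pvAnchorTails_ne]),
      pvStage all_tests
        (fun _ _ tails => tails.any (fun tail => PySem.Chars.startswith tail
            (PySem.Chars.strip (PySem.Chars.replace (PySem.Chars.lower test_name.toList) "delete".toList []))))
        (fun t => PySem.Chars.isIn ("create".toList
            ++ PySem.Chars.strip (PySem.Chars.replace (PySem.Chars.lower test_name.toList) "delete".toList []))
            (PySem.Chars.lower t.toList))
        PySem.Set.add
        (fun t => pvAnchorTails_any _ _),
      pvStage all_tests
        (fun _ _ tails => tails.any (fun tail => PySem.Chars.startswith tail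
            (PySem.Chars.strip (PySem.Chars.replace (PySem.Chars.lower test_name.toList) "update".toList []))))
        (fun t => PySem.Chars.isIn ("create".toList
            ++ PySem.Chars.strip (PySem.Chars.replace (PySem.Chars.lower test_name.toList) "update".toList []))
            (PySem.Chars.lower t.toList))
        PySem.Set.add
        (fun t => pvAnchorTails_any _ _)]

-- ===== VERDICT =====
theorem find_dependencies_py_spec : Claim_equal_find_dependencies_py := by
  intro tn ats tf _
  exact find_dependencies_py_eq tn ats tf
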